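-- pv_equiv track=rewrite | github.com/hiro-collab/ai_talk_core | src/web/app.py | normalize_event_name
-- ===== SOURCE A (Python) =====
-- def normalize_event_name(value: object) -> str:
--     """Return a compact event name accepted by the local event ingest API."""
--     if value is None:
--         return ""
--     normalized = str(value).strip()
--     if not normalized or len(normalized) > 80:
--         return ""
--     allowed = set("abcdefghijklmnopqrstuvwxyzABCDEFGHIJKLMNOPQRSTUVWXYZ0123456789_")
--     if any(character not in allowed for character in normalized):
--         return ""
--     return normalized
-- ===== SOURCE B (Python) =====
-- def normalize_event_name(value: object) -> str:
--     """Return a compact event name accepted by the local event ingest API."""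
--     if value is None:
--         return ""
--     allowed = "abcdefghijklmnopqrstuvwxyzABCDEFGHIJKLMNOPQRSTUVWXYZ0123456789_"
--     # Single pass with a three-state scanner: 0 = leading whitespace,
--     # 1 = name body, 2 = trailing whitespace. Strips, validates and
--     # collects the name in one traversal of the raw string.
--     state = 0
--     body = []
--     for ch in str(value):
--         if ch.isspace():
--             if state == 1:
--                 state = 2
--         elif ch in allowed and state != 2:
--             body.append(ch)
--             state = 1
--         else:
--             return ""
--     if state == 0 or len(body) > 80:
--         return ""
--     return "".join(body)
-- ===== Notes on version B (the rewrite author's own statement) =====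
-- stated objective: alternative
-- what changed: Replaces A's staged pipeline (strip the string, then length guards, then a per-character allowed-set scan of the stripped copy) with a single pass over the raw string driven by a three-state scanner (leading whitespace / name body / trailing whitespace) that strips, validates and collects the name in one traversal with early exit on the first illegal character.
import Mathlib
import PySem

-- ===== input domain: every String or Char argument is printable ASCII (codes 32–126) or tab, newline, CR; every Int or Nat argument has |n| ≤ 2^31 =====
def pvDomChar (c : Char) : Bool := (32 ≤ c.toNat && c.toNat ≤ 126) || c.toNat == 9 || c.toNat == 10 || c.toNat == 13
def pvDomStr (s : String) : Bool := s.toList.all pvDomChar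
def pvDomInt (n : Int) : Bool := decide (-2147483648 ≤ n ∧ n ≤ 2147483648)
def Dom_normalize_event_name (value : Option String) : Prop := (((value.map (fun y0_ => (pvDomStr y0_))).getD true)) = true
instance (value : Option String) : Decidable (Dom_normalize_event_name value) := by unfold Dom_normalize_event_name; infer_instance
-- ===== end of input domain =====

-- B replaces A's staged pipeline (strip, then length guards, then a per-character
-- set-membership scan) by ONE pass over the raw string with a three-state scanner
-- (leading whitespace / name body / trailing whitespace) that strips, validates and
-- collects the name in a single traversal; objective: alternative single-pass algorithm.

-- ===== PORT A =====
def normalize_event_name (value : Option String) : String :=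
  match value with
  | none => ""
  | some v =>
    let normalized := PySem.Str.strip v
    if PySem.Str.len normalized == 0 || PySem.Str.len normalized > 80 then ""
    else
      let allowed : PySem.Set Char :=
        PySem.Set.ofList "abcdefghijklmnopqrstuvwxyzABCDEFGHIJKLMNOPQRSTUVWXYZ0123456789_".toList
      if normalized.toList.any (fun character => !(PySem.Set.contains allowed character)) then ""
      else normalized

-- ===== PORT B =====
def pvAllowed : List Char := "abcdefghijklmnopqrstuvwxyzABCDEFGHIJKLMNOPQRSTUVWXYZ0123456789_".toList

-- the for-loop of Source B: state 0 = leading whitespace, 1 = body, 2 = trailing whitespace;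
-- `none` is Source B's early `return ""` inside the loop
def pvScan : Nat → List Char → List Char → Option (Nat × List Char)
  | state, body, [] => some (state, body)
  | state, body, ch :: rest =>
    if PySem.Chars.isspace ch then
      pvScan (if state == 1 then 2 else state) body rest
    else if pvAllowed.contains ch && state != 2 then
      pvScan 1 (body ++ [ch]) rest
    else none

def normalize_event_name_alt (value : Option String) : String :=
  match value with
  | none => ""
  | some v =>
    match pvScan 0 [] v.toList with
    | none => ""
    | some (state, body) =>
      -- "".join(body) of single-character strings concatenates the characters: String.ofList
      if state == 0 || body.length > 80 then "" else String.ofList body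

-- ===== PRECONDITION & SPEC =====
def Spec_normalize_event_name (value : Option String) (out : String) : Prop := out = normalize_event_name_alt value
instance (value : Option String) (out : String) : Decidable (Spec_normalize_event_name value out) := by unfold Spec_normalize_event_name; infer_instance

-- ===== CLAIM (what is proved, stated in full; the proofs are below) =====
def Claim_equal_normalize_event_name : Prop := ∀ (value : Option String), Dom_normalize_event_name value → Spec_normalize_event_name value (normalize_event_name value)

-- ===== LEMMAS AND PROOFS =====

theorem pvAllowed_not_space : ∀ c, c ∈ pvAllowed → PySem.Chars.isspace c = false := by
  have h : pvAllowed.all (fun c => !PySem.Chars.isspace c) = true := by decide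
  intro c hc
  simpa using List.all_eq_true.mp h c hc

theorem set_ofList_contains (al : List Char) (c : Char) :
    (PySem.Set.ofList al).contains c = al.contains c := by
  rw [Bool.eq_iff_iff]
  simp [PySem.Set.mem_ofList]

theorem pv_list_eq :
    "abcdefghijklmnopqrstuvwxyzABCDEFGHIJKLMNOPQRSTUVWXYZ0123456789_".toList = pvAllowed := rfl

-- rstrip on a cons
theorem rstrip_cons (c : Char) (rest : List Char) :
    PySem.Chars.rstrip (c :: rest) =
      if (c :: rest).all PySem.Chars.isspace = true then [] else c :: PySem.Chars.rstrip rest := by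
  simp only [PySem.Chars.rstrip, List.reverse_cons, List.dropWhile_append]
  by_cases h : (List.dropWhile PySem.Chars.isspace rest.reverse) = []
  · have hall : rest.all PySem.Chars.isspace = true := by
      rw [List.dropWhile_eq_nil_iff] at h
      exact List.all_eq_true.mpr (fun x hx => h x (List.mem_reverse.mpr hx))
    by_cases hc : PySem.Chars.isspace c
    · simp [h, hc, hall, List.dropWhile]
    · simp [h, hc, hall, List.dropWhile]
  · have hex : ∃ x ∈ rest, ¬ PySem.Chars.isspace x := by
      rw [List.dropWhile_eq_nil_iff] at h
      push Not at h
      obtain ⟨x, hx, hxs⟩ := h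
      exact ⟨x, List.mem_reverse.mp hx, by simpa using hxs⟩
    have hall : (c :: rest).all PySem.Chars.isspace = false := by
      obtain ⟨x, hx, hxs⟩ := hex
      simp only [List.all_eq_false]
      exact ⟨x, List.mem_cons_of_mem _ hx, by simpa using hxs⟩
    simp [h, hall]

-- state 0 skips leading whitespace
theorem pvScan_zero_dropWhile (cs : List Char) (body : List Char) :
    pvScan 0 body cs = pvScan 0 body (cs.dropWhile PySem.Chars.isspace) := by
  induction cs with
  | nil => rfl
  | cons c rest ih =>
    by_cases h : PySem.Chars.isspace c
    · simp [pvScan, h, ih]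
    · simp [pvScan, h]

-- state 2 accepts exactly trailing whitespace
theorem pvScan_two (cs : List Char) (body : List Char) :
    pvScan 2 body cs = if cs.all PySem.Chars.isspace then some (2, body) else none := by
  induction cs with
  | nil => rfl
  | cons c rest ih =>
    by_cases h : PySem.Chars.isspace c
    · simp [pvScan, h, ih]
    · simp [pvScan, h]

-- state 1, success case
theorem pvScan_one_ok (cs : List Char) (body : List Char)
    (h : (PySem.Chars.rstrip cs).all (fun c => pvAllowed.contains c) = true) :
    ∃ st, st ≠ 0 ∧ pvScan 1 body cs = some (st, body ++ PySem.Chars.rstrip cs) := by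
  induction cs generalizing body with
  | nil => exact ⟨1, by decide, by simp [pvScan, PySem.Chars.rstrip]⟩
  | cons c rest ih =>
    rw [rstrip_cons] at h ⊢
    by_cases hall : (c :: rest).all PySem.Chars.isspace = true
    · have hc : PySem.Chars.isspace c := by
        simpa using (List.all_eq_true.mp hall c List.mem_cons_self)
      have hrest : rest.all PySem.Chars.isspace = true := by
        refine List.all_eq_true.mpr (fun x hx => List.all_eq_true.mp hall x (List.mem_cons_of_mem _ hx))
      refine ⟨2, by decide, ?_⟩
      rw [if_pos hall]
      simp [pvScan, hc, pvScan_two, hrest]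
    · rw [if_neg hall] at h ⊢
      simp only [List.all_cons, Bool.and_eq_true] at h
      have hmem : c ∈ pvAllowed := List.contains_iff_mem.mp h.1
      have hc : PySem.Chars.isspace c = false := pvAllowed_not_space c hmem
      obtain ⟨st, hst, heq⟩ := ih (body ++ [c]) h.2
      refine ⟨st, hst, ?_⟩
      simp [pvScan, hc, hmem, heq]

-- state 1, failure case
theorem pvScan_one_bad (cs : List Char) (body : List Char)
    (h : (PySem.Chars.rstrip cs).all (fun c => pvAllowed.contains c) = false) :
    pvScan 1 body cs = none := by
  induction cs generalizing body with
  | nil => simp [PySem.Chars.rstrip] at h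
  | cons c rest ih =>
    rw [rstrip_cons] at h
    by_cases hall : (c :: rest).all PySem.Chars.isspace = true
    · rw [if_pos hall] at h
      simp at h
    · rw [if_neg hall] at h
      by_cases hc : PySem.Chars.isspace c
      · have hrest : rest.all PySem.Chars.isspace = false := by
          by_contra hx
          have hb : rest.all PySem.Chars.isspace = true := by simpa using hx
          exact hall (by simp [List.all_cons, hc, hb])
        simp [pvScan, hc, pvScan_two, hrest]
      · simp only [List.all_cons, Bool.and_eq_false_iff] at h
        by_cases hmem : c ∈ pvAllowed
        · rcases h with h | h
          · exact absurd hmem (by simpa using h)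
          · simp [pvScan, hc, hmem, ih (body ++ [c]) h]
        · simp [pvScan, hc, hmem]

theorem not_space_of_dropWhile_cons {l t : List Char} {a : Char}
    (h : List.dropWhile PySem.Chars.isspace l = a :: t) : PySem.Chars.isspace a = false := by
  induction l with
  | nil => simp at h
  | cons x xs ih =>
    rw [List.dropWhile_cons] at h
    by_cases hx : PySem.Chars.isspace x
    · exact ih (by simpa [hx] using h)
    · simp only [hx, if_false, Bool.false_eq_true] at h
      cases h
      simpa using hx

-- ===== VERDICT (by name: the statement is the Claim_ definition above) =====
theorem normalize_event_name_spec : Claim_equal_normalize_event_name := by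
  intro value _
  unfold Spec_normalize_event_name
  cases value with
  | none => rfl
  | some v =>
    have hstrip : PySem.Chars.strip v.toList =
        PySem.Chars.rstrip (List.dropWhile PySem.Chars.isspace v.toList) := rfl
    simp only [normalize_event_name, normalize_event_name_alt]
    rw [pvScan_zero_dropWhile]
    cases hL : List.dropWhile PySem.Chars.isspace v.toList with
    | nil =>
      simp [pvScan, PySem.Str.len_eq, PySem.Str.toList_strip, hstrip, hL, PySem.Chars.rstrip]
    | cons c r =>
      have hc : PySem.Chars.isspace c = false := not_space_of_dropWhile_cons hL
      have hall : (c :: r).all PySem.Chars.isspace = false := by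
        simp only [List.all_eq_false]
        exact ⟨c, List.mem_cons_self, by simp [hc]⟩
      have hN : PySem.Chars.strip v.toList = c :: PySem.Chars.rstrip r := by
        rw [hstrip, hL, rstrip_cons, if_neg (by simp [hall])]
      simp only [PySem.Str.len_eq, PySem.Str.toList_strip, set_ofList_contains, pv_list_eq]
      rw [hN]
      by_cases hmem : c ∈ pvAllowed
      · by_cases hrest : (PySem.Chars.rstrip r).all (fun x => pvAllowed.contains x) = true
        · obtain ⟨st, hst, heq⟩ := pvScan_one_ok r [c] hrest
          have hscan : pvScan 0 [] (c :: r) = some (st, c :: PySem.Chars.rstrip r) := by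
            simpa [pvScan, hc, hmem] using heq
          have hany : ((c :: PySem.Chars.rstrip r).any
              (fun character => !pvAllowed.contains character)) = false := by
            simp only [List.any_eq_false]
            intro x hx
            rcases List.mem_cons.mp hx with rfl | hx
            · simpa using List.contains_iff_mem.mpr hmem
            · simpa using List.all_eq_true.mp hrest x hx
          have hst0 : (st == 0) = false := by simpa using hst
          simp only [hscan]
          by_cases hlen : (80 : Nat) < (c :: PySem.Chars.rstrip r).length
          · rw [if_pos (by simp at hlen ⊢; omega), if_pos (by simp [hst0] at hlen ⊢; omega)]
          · rw [if_neg (by simp at hlen ⊢; omega), if_neg (by rw [hany]; simp),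
              if_neg (by simp [hst0] at hlen ⊢; omega), PySem.Str.strip, hstrip, hL, rstrip_cons,
              if_neg (by simp [hall])]
        · have hbad := pvScan_one_bad r [c] (by simpa using hrest)
          have hscan : pvScan 0 [] (c :: r) = none := by
            simp [pvScan, hc, hmem, hbad]
          have hany : ((c :: PySem.Chars.rstrip r).any
              (fun character => !pvAllowed.contains character)) = true := by
            simp only [List.all_eq_true] at hrest
            push Not at hrest
            obtain ⟨x, hx, hxc⟩ := hrest
            simp only [List.any_eq_true]
            exact ⟨x, List.mem_cons_of_mem _ hx, by simpa using hxc⟩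
          simp only [hscan]
          split_ifs <;> first | rfl | (exact absurd hany (by assumption))
      · have hscan : pvScan 0 [] (c :: r) = none := by
          simp [pvScan, hc, hmem]
        have hany : ((c :: PySem.Chars.rstrip r).any
            (fun character => !pvAllowed.contains character)) = true := by
          simp only [List.any_eq_true]
          exact ⟨c, List.mem_cons_self, by simpa using hmem⟩
        simp only [hscan]
        split_ifs <;> first | rfl | (exact absurd hany (by assumption))
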